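-- pv_equiv track=rewrite | github.com/danyow-cheung/Algorithms_python | leetcode/greedy_2383.py | minNumberOfHours_leetcode
-- ===== SOURCE A (Python) =====
-- def minNumberOfHours_leetcode(initialEnergy, initialExperience, energy, experience):
--     """
--     :type initialEnergy: int
--     :type initialExperience: int
--     :type energy: List[int]
--     :type experience: List[int]
--     :rtype: int
--     """
--     ans = 0
--     for x, y in zip(energy, experience):
--         if initialEnergy <= x:
--             ans += x + 1 - initialEnergy
--             initialEnergy = x + 1
--         if initialExperience <= y:
--             ans += y + 1 - initialExperience
--             initialExperience = y + 1
--         initialEnergy -= x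
--         initialExperience += y
--     return ans
-- ===== SOURCE B (Python) =====
-- def minNumberOfHours_leetcode(initialEnergy, initialExperience, energy, experience):
--     n = min(len(energy), len(experience))
--     # inclusive prefix sums of the paired energy costs
--     peaks = []
--     s = 0
--     for v in energy[:n]:
--         s += v
--         peaks.append(s)
--     # experience hurdle at step k measured against the experience already banked
--     gaps = []
--     s = 0
--     for v in experience[:n]:
--         gaps.append(v + 1 - s)
--         s += v
--     needE = max([0] + [p + 1 - initialEnergy for p in peaks])
--     needX = max([0] + [g - initialExperience for g in gaps])
--     return needE + needX
-- ===== Notes on version B (the rewrite author's own statement) =====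
-- stated objective: alternative
-- what changed: Replaces A's greedy simulation (conditional top-ups mutating current energy/experience inside one loop) by a prefix-sum deficit analysis: build inclusive energy prefix sums and per-step experience hurdles, then take extra hours as max(0, max deficit) for each resource and add them.
import Mathlib
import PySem

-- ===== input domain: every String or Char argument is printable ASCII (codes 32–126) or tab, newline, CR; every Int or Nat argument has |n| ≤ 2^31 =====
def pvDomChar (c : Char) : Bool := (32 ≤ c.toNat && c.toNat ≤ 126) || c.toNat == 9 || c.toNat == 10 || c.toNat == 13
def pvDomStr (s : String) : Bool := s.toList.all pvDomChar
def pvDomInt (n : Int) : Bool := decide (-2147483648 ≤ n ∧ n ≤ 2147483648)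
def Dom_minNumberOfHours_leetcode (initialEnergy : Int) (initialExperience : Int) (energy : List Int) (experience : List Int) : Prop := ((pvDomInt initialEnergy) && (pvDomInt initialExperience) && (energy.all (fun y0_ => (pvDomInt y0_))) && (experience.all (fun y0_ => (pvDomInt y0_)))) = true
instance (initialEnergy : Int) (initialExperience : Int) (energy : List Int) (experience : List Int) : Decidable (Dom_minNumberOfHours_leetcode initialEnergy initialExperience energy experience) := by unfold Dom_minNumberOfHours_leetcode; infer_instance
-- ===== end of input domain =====

-- B replaces A's greedy top-up simulation by a prefix-sum deficit analysis (two passes + maxima); objective: alternative/simpler, not faster.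

-- ===== PORT A =====
-- one step of A's loop over zip(energy, experience); state = (ans, initialEnergy, initialExperience)
def pvStepA (st : Int × Int × Int) (xy : Int × Int) : Int × Int × Int :=
  let a := st.1; let iE := st.2.1; let iX := st.2.2
  let x := xy.1; let y := xy.2
  let a1 := if iE ≤ x then a + (x + 1 - iE) else a
  let iE1 := if iE ≤ x then x + 1 else iE
  let a2 := if iX ≤ y then a1 + (y + 1 - iX) else a1
  let iX1 := if iX ≤ y then y + 1 else iX
  (a2, iE1 - x, iX1 + y)

def minNumberOfHours_leetcode (initialEnergy : Int) (initialExperience : Int) (energy : List Int) (experience : List Int) : Int :=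
  ((energy.zip experience).foldl pvStepA (0, initialEnergy, initialExperience)).1

-- ===== PORT B =====
-- inclusive prefix sums of the paired energy costs (B's first pass)
def pvPeaks (l : List Int) (s : Int) : List Int :=
  match l with
  | [] => []
  | v :: t => (s + v) :: pvPeaks t (s + v)

-- experience hurdle y+1 minus experience already banked (B's second pass)
def pvGaps (l : List Int) (s : Int) : List Int :=
  match l with
  | [] => []
  | v :: t => (v + 1 - s) :: pvGaps t (s + v)

def minNumberOfHours_leetcode_alt (initialEnergy : Int) (initialExperience : Int) (energy : List Int) (experience : List Int) : Int :=
  let n : Int := min (energy.length : Int) (experience.length : Int)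
  let peaks := pvPeaks (PySem.List.slice energy none (some n)) 0
  let gaps := pvGaps (PySem.List.slice experience none (some n)) 0
  let needE := (peaks.map (fun p => p + 1 - initialEnergy)).foldl max 0
  let needX := (gaps.map (fun g => g - initialExperience)).foldl max 0
  needE + needX

-- ===== PRECONDITION & SPEC =====
def Spec_minNumberOfHours_leetcode (initialEnergy : Int) (initialExperience : Int) (energy : List Int) (experience : List Int) (out : Int) : Prop := out = minNumberOfHours_leetcode_alt initialEnergy initialExperience energy experience
instance (initialEnergy : Int) (initialExperience : Int) (energy : List Int) (experience : List Int) (out : Int) : Decidable (Spec_minNumberOfHours_leetcode initialEnergy initialExperience energy experience out) := by unfold Spec_minNumberOfHours_leetcode; infer_instance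

-- ===== CLAIM (what is proved, stated in full; the proofs are below) =====
def Claim_equal_minNumberOfHours_leetcode : Prop := ∀ (initialEnergy : Int) (initialExperience : Int) (energy : List Int) (experience : List Int), Dom_minNumberOfHours_leetcode initialEnergy initialExperience energy experience → Spec_minNumberOfHours_leetcode initialEnergy initialExperience energy experience (minNumberOfHours_leetcode initialEnergy initialExperience energy experience)

-- ===== LEMMAS AND PROOFS =====

-- invariant: A's simulated state is (E0 + p - s, X0 + q + t) where p/q are the extra hours
-- already granted and s/t the prefix sums consumed/banked; B's maxima continue p and q.
theorem pv_inv (E0 X0 : Int) (l : List (Int × Int)) : ∀ (a p q s t : Int),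
    (l.foldl pvStepA (a, E0 + p - s, X0 + q + t)).1
      = a + ((pvPeaks (l.map Prod.fst) s).map (fun v => v + 1 - E0)).foldl max p - p
          + ((pvGaps (l.map Prod.snd) t).map (fun g => g - X0)).foldl max q - q := by
  induction l with
  | nil => intro a p q s t; simp [pvPeaks, pvGaps]
  | cons hd tl ih =>
    intro a p q s t
    obtain ⟨x, y⟩ := hd
    have h1 : pvStepA (a, E0 + p - s, X0 + q + t) (x, y)
        = (a + (max p (s + x + 1 - E0) - p) + (max q (y + 1 - t - X0) - q),
           E0 + max p (s + x + 1 - E0) - (s + x),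
           X0 + max q (y + 1 - t - X0) + (t + y)) := by
      simp only [pvStepA]
      split_ifs <;> simp only [Prod.mk.injEq] <;> refine ⟨by omega, by omega, by omega⟩
    simp only [List.foldl_cons, h1, pvPeaks, pvGaps, List.map_cons]
    rw [ih]
    ring

theorem pv_zip_fst (l₁ : List Int) : ∀ l₂ : List Int,
    (l₁.zip l₂).map Prod.fst = l₁.take (min l₁.length l₂.length) := by
  induction l₁ with
  | nil => intro l₂; simp
  | cons h t ih =>
    intro l₂
    cases l₂ with
    | nil => simp
    | cons h2 t2 => simp [ih t2, Nat.succ_min_succ]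

theorem pv_zip_snd (l₁ : List Int) : ∀ l₂ : List Int,
    (l₁.zip l₂).map Prod.snd = l₂.take (min l₁.length l₂.length) := by
  induction l₁ with
  | nil => intro l₂; simp
  | cons h t ih =>
    intro l₂
    cases l₂ with
    | nil => simp
    | cons h2 t2 => simp [ih t2, Nat.succ_min_succ]

-- ===== VERDICT (by name: the statement is the Claim_ definition above) =====
theorem minNumberOfHours_leetcode_spec : Claim_equal_minNumberOfHours_leetcode := by
  intro E0 X0 energy experience _
  unfold Spec_minNumberOfHours_leetcode minNumberOfHours_leetcode minNumberOfHours_leetcode_alt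
  have hmin : min ((energy.length : Int)) ((experience.length : Int))
      = ((min energy.length experience.length : Nat) : Int) := by
    push_cast; omega
  have hsl1 : PySem.List.slice energy none (some ((min energy.length experience.length : Nat) : Int))
      = energy.take (min energy.length experience.length) := PySem.List.slice_to_natCast _ _
  have hsl2 : PySem.List.slice experience none (some ((min energy.length experience.length : Nat) : Int))
      = experience.take (min energy.length experience.length) := PySem.List.slice_to_natCast _ _
  simp only [hmin, hsl1, hsl2]
  have := pv_inv E0 X0 (energy.zip experience) 0 0 0 0 0
  simp only [add_zero, sub_zero, zero_add] at this
  rw [this, pv_zip_fst, pv_zip_snd]
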